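-- pv_equiv track=rewrite | github.com/kidsama/code_note | 00.b.test/test010.py | check_total_contain_4
-- ===== SOURCE A (Python) =====
-- from typing import List
--
-- def check_total_contain_4(area_paths_a: List[str], area_paths_b: List[str]) -> bool:
--     if None in area_paths_b:
--         return False
--     for path_a in area_paths_a:
--         if path_a is not None and all(
--                 not f"{path_a},".startswith(f"{path_b},") for path_b in area_paths_b
--         ):
--             return False
--     return True
-- ===== SOURCE B (Python) =====
-- def check_total_contain_4(area_paths_a, area_paths_b):
--     if None in area_paths_b:
--         return False
--     ancestors = {tuple(p.split(',')) for p in area_paths_b}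
--     for path_a in area_paths_a:
--         if path_a is None:
--             continue
--         toks = path_a.split(',')
--         if not any(tuple(toks[:i]) in ancestors for i in range(1, len(toks) + 1)):
--             return False
--     return True
-- ===== Notes on version B (the rewrite author's own statement) =====
-- stated objective: alternative
-- what changed: A compares each path_a against every path_b with comma-padded startswith; B tokenizes every path on ',' once, builds a set of area_paths_b token tuples, and checks each path_a by looking up its token prefixes in that set, so the inner scan over area_paths_b disappears (trades it for per-path tokenization and hashing).
import Mathlib
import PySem

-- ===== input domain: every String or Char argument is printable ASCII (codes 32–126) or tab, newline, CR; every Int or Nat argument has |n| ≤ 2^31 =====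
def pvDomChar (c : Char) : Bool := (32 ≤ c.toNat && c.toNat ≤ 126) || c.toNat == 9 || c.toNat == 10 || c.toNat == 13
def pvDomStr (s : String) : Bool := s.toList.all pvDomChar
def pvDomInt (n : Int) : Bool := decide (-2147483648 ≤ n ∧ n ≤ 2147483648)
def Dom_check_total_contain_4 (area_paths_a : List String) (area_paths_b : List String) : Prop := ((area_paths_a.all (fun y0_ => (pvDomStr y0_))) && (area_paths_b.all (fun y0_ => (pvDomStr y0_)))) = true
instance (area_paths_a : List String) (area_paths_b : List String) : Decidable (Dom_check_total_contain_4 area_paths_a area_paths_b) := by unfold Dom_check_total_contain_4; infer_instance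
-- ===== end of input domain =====

-- B replaces A's per-path scan over area_paths_b (comma-padded startswith) by a set of token-tuples
-- built once from area_paths_b, against which each path_a's token prefixes are looked up (objective: alternative).
-- Under the type convention the arguments are lists of strings, so Python's 'None in area_paths_b'
-- guard and 'path_a is not None' test are vacuous and leave no trace in the ports.

-- ===== PORT A =====
-- the loop 'for path_a in area_paths_a: if all(...): return False' / final 'return True'
def ctc4Loop (area_paths_b : List String) : List String → Bool
  | [] => true
  | path_a :: rest =>
      -- f"{x}," is ported on code points as x.toList ++ [','] (exact: plain concatenation)
      if area_paths_b.all (fun path_b =>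
          !(PySem.Chars.startswith (path_a.toList ++ [',']) (path_b.toList ++ [',']))) then
        false
      else ctc4Loop area_paths_b rest

def check_total_contain_4 (area_paths_a : List String) (area_paths_b : List String) : Bool :=
  ctc4Loop area_paths_b area_paths_a

-- ===== PORT B =====
-- p.split(',') (sep nonempty, so Python never raises; = the 'some' case of PySem.Chars.split?)
def pvTokens (p : String) : List (List Char) := PySem.Chars.splitOn p.toList [',']

def check_total_contain_4_alt (area_paths_a : List String) (area_paths_b : List String) : Bool :=
  let ancestors : PySem.Set (List (List Char)) := PySem.Set.ofList (area_paths_b.map pvTokens)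
  area_paths_a.all (fun path_a =>
    let toks := pvTokens path_a
    (PySem.List.pyRange 1 ((toks.length : Int) + 1) 1).any (fun i =>
      ancestors.contains (PySem.List.slice toks none (some i))))

-- ===== PRECONDITION & SPEC =====
def Spec_check_total_contain_4 (area_paths_a : List String) (area_paths_b : List String) (out : Bool) : Prop := out = check_total_contain_4_alt area_paths_a area_paths_b
instance (area_paths_a : List String) (area_paths_b : List String) (out : Bool) : Decidable (Spec_check_total_contain_4 area_paths_a area_paths_b out) := by unfold Spec_check_total_contain_4; infer_instance

-- ===== CLAIM (what is proved, stated in full; the proofs are below) =====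
def Claim_equal_check_total_contain_4 : Prop := ∀ (area_paths_a : List String) (area_paths_b : List String), Dom_check_total_contain_4 area_paths_a area_paths_b → Spec_check_total_contain_4 area_paths_a area_paths_b (check_total_contain_4 area_paths_a area_paths_b)

-- ===== LEMMAS AND PROOFS =====

-- simple structural model of s.split(',') used only in the proofs
def splitComma : List Char → List (List Char)
  | [] => [[]]
  | c :: rest =>
      if c = ',' then [] :: splitComma rest
      else
        match splitComma rest with
        | t :: ts => (c :: t) :: ts
        | [] => [[c]]

theorem splitComma_cons_ne (l : List Char) : ∃ t ts, splitComma l = t :: ts := by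
  cases l with
  | nil => exact ⟨[], [], rfl⟩
  | cons c rest =>
      by_cases h : c = ','
      · exact ⟨[], splitComma rest, by simp [splitComma, h]⟩
      · rcases hr : splitComma rest with _ | ⟨t, ts⟩
        · exact ⟨[c], [], by simp [splitComma, h, hr]⟩
        · exact ⟨c :: t, ts, by simp [splitComma, h, hr]⟩

theorem go_eq : ∀ (fuel : Nat) (l cur : List Char) (acc : List (List Char)),
    l.length < fuel →
    PySem.Chars.splitOn.go [','] fuel l cur acc =
      acc.reverse ++
        (match splitComma l with
         | t :: ts => (cur.reverse ++ t) :: ts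
         | [] => [cur.reverse]) := by
  intro fuel
  induction fuel with
  | zero => intro l cur acc h; omega
  | succ n ih =>
      intro l cur acc h
      cases l with
      | nil => simp [PySem.Chars.splitOn.go, splitComma]
      | cons c rest =>
          by_cases hc : c = ','
          · subst hc
            have hpre : List.isPrefixOf [','] (',' :: rest) = true := by
              simp [List.isPrefixOf]
            rw [PySem.Chars.splitOn.go]
            simp only [hpre, if_true, List.length_cons, List.length_nil,
              List.drop_succ_cons, List.drop_zero]
            rw [ih rest [] (cur.reverse :: acc) (by simpa using Nat.lt_of_succ_lt_succ h)]
            rcases splitComma_cons_ne rest with ⟨t, ts, hr⟩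
            simp [splitComma, hr]
          · have hpre : List.isPrefixOf [','] (c :: rest) = false := by
              simp [List.isPrefixOf]
              exact fun hh => (hc hh.symm)
            rw [PySem.Chars.splitOn.go]
            simp only [hpre, Bool.false_eq_true, if_false]
            rw [ih rest (c :: cur) acc (by simpa using Nat.lt_of_succ_lt_succ h)]
            rcases splitComma_cons_ne rest with ⟨t, ts, hr⟩
            simp [splitComma, hr, hc]

theorem splitOn_eq_splitComma (l : List Char) :
    PySem.Chars.splitOn l [','] = splitComma l := by
  rcases splitComma_cons_ne l with ⟨t, ts, hr⟩
  unfold PySem.Chars.splitOn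
  rw [go_eq (l.length + 1) l [] [] (by omega)]
  simp [hr]

theorem pvTokens_eq (p : String) : pvTokens p = splitComma p.toList :=
  splitOn_eq_splitComma p.toList

-- the crux: comma-padded startswith IS token-list prefix
theorem startswith_iff_tokens_prefix : ∀ (b a : List Char),
    PySem.Chars.startswith (a ++ [',']) (b ++ [',']) =
      (splitComma b).isPrefixOf (splitComma a) := by
  intro b
  induction b with
  | nil =>
      intro a
      cases a with
      | nil => decide
      | cons d a' =>
          rcases splitComma_cons_ne a' with ⟨t, ts, hr⟩
          by_cases hd : d = ','
          · simp [PySem.Chars.startswith, List.isPrefixOf, splitComma, hd, hr]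
          · have hd' : ¬(',' = d) := fun hh => hd hh.symm
            simp [PySem.Chars.startswith, List.isPrefixOf, splitComma, hd, hd', hr]
  | cons c b' ih =>
      intro a
      cases a with
      | nil =>
          rcases splitComma_cons_ne b' with ⟨t, ts, hr⟩
          by_cases hc : c = ','
          · simp [PySem.Chars.startswith, List.isPrefixOf, splitComma, hc, hr]
          · simp [PySem.Chars.startswith, List.isPrefixOf, splitComma, hc, hr]
      | cons d a' =>
          rcases splitComma_cons_ne b' with ⟨t, ts, hr⟩
          rcases splitComma_cons_ne a' with ⟨u, us, ha⟩
          have ihs := ih a'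
          by_cases hc : c = ',' <;> by_cases hd : d = ','
          · subst hc; subst hd
            simpa [PySem.Chars.startswith, List.isPrefixOf, splitComma] using ihs
          · have hd' : ¬(',' = d) := fun hh => hd hh.symm
            subst hc
            simp [PySem.Chars.startswith, List.isPrefixOf, splitComma, hd, hd', hr, ha]
          · have hc' : ¬(c = ',') := hc
            subst hd
            simp [PySem.Chars.startswith, List.isPrefixOf, splitComma, hc', hr, ha]
          · by_cases hcd : c = d
            · subst hcd
              simp only [splitComma, if_neg hc, hr, ha] at ihs ⊢
              simp only [PySem.Chars.startswith, List.cons_append, List.isPrefixOf,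
                beq_self_eq_true, Bool.true_and] at ihs ⊢
              simp at ihs ⊢
              simpa using ihs
            · have hbe : (c == d) = false := by simp [hcd]
              simp [PySem.Chars.startswith, List.isPrefixOf, splitComma, hc, hd, hr, ha, hbe]

-- B's per-path check, characterized: some token list of area_paths_b is a prefix of path_a's
theorem alt_elem_iff (path_a : String) (area_paths_b : List String) :
    ((PySem.List.pyRange 1 (((pvTokens path_a).length : Int) + 1) 1).any (fun i =>
        (PySem.Set.ofList (area_paths_b.map pvTokens)).contains
          (PySem.List.slice (pvTokens path_a) none (some i))) = true) ↔
      ∃ path_b ∈ area_paths_b, (pvTokens path_b).isPrefixOf (pvTokens path_a) = true := by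
  constructor
  · rintro h
    rcases List.any_eq_true.mp h with ⟨i, hi, hmem⟩
    rcases (PySem.List.mem_pyRange_one).mp hi with ⟨h1, h2⟩
    rw [PySem.List.slice_to _ (by omega : (0:Int) ≤ i)] at hmem
    have hmem' : (pvTokens path_a).take i.toNat ∈
        PySem.Set.ofList (area_paths_b.map pvTokens) :=
      List.contains_iff_mem.mp hmem
    rcases List.mem_map.mp ((PySem.Set.mem_ofList _ _).mp hmem') with ⟨pb, hpb, htok⟩
    refine ⟨pb, hpb, ?_⟩
    rw [htok]
    exact List.isPrefixOf_iff_prefix.mpr (List.take_prefix _ _)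
  · rintro ⟨pb, hpb, hpre⟩
    have hpre' := List.isPrefixOf_iff_prefix.mp hpre
    have hlen : (pvTokens pb).length ≤ (pvTokens path_a).length := hpre'.length_le
    rcases splitComma_cons_ne pb.toList with ⟨t, ts, hr⟩
    have hne : (pvTokens pb).length ≠ 0 := by
      rw [pvTokens_eq, hr]; simp
    refine List.any_eq_true.mpr ⟨((pvTokens pb).length : Int), ?_, ?_⟩
    · exact PySem.List.mem_pyRange_one.mpr ⟨by exact_mod_cast Nat.one_le_iff_ne_zero.mpr hne,
        by exact_mod_cast Nat.lt_succ_of_le hlen⟩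
    · rw [PySem.List.slice_to _ (Int.natCast_nonneg _)]
      simp only [Int.toNat_natCast]
      rw [← List.prefix_iff_eq_take.mp hpre']
      exact List.contains_iff_mem.mpr ((PySem.Set.mem_ofList _ _).mpr
        (List.mem_map.mpr ⟨pb, hpb, rfl⟩))

-- A's per-path check, characterized the same way
theorem a_elem_iff (path_a : String) (area_paths_b : List String) :
    ((area_paths_b.all (fun path_b =>
        !(PySem.Chars.startswith (path_a.toList ++ [',']) (path_b.toList ++ [','])))) = false) ↔
      ∃ path_b ∈ area_paths_b, (pvTokens path_b).isPrefixOf (pvTokens path_a) = true := by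
  rw [List.all_eq_false]
  constructor <;> rintro ⟨pb, hpb, h⟩ <;> refine ⟨pb, hpb, ?_⟩
  · have h' : PySem.Chars.startswith (path_a.toList ++ [',']) (pb.toList ++ [',']) = true := by
      simpa using h
    rw [startswith_iff_tokens_prefix] at h'
    rw [pvTokens_eq, pvTokens_eq]
    exact h'
  · rw [pvTokens_eq, pvTokens_eq] at h
    simp [startswith_iff_tokens_prefix, h]

theorem ctc4Loop_eq (area_paths_b : List String) : ∀ (area_paths_a : List String),
    ctc4Loop area_paths_b area_paths_a =
      check_total_contain_4_alt area_paths_a area_paths_b := by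
  intro as
  induction as with
  | nil => simp [ctc4Loop, check_total_contain_4_alt]
  | cons pa rest ih =>
      have hiff := (a_elem_iff pa area_paths_b).trans (alt_elem_iff pa area_paths_b).symm
      rw [ctc4Loop]
      simp only [check_total_contain_4_alt] at ih ⊢
      simp only [List.all_cons]
      cases hB : ((PySem.List.pyRange 1 (((pvTokens pa).length : Int) + 1) 1).any (fun i =>
          (PySem.Set.ofList (area_paths_b.map pvTokens)).contains
            (PySem.List.slice (pvTokens pa) none (some i)))) with
      | false =>
          have hall : (area_paths_b.all (fun path_b =>
              !(PySem.Chars.startswith (pa.toList ++ [','])  (path_b.toList ++ [','])))) = true := by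
            cases hx : (area_paths_b.all (fun path_b =>
                !(PySem.Chars.startswith (pa.toList ++ [','])  (path_b.toList ++ [','])))) with
            | true => rfl
            | false => exact absurd (hiff.mp hx) (by rw [hB]; simp)
          rw [if_pos hall]
          simp
      | true =>
          have hall := hiff.mpr hB
          rw [if_neg (by simp [hall]), ih]
          simp

-- ===== VERDICT (by name: the statement is the Claim_ definition above) =====
theorem check_total_contain_4_spec : Claim_equal_check_total_contain_4 := by
  intro a b _
  unfold Spec_check_total_contain_4 check_total_contain_4
  exact ctc4Loop_eq b a
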